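-- pv_equiv track=rewrite | github.com/vladbalmos/mitzasql | mitzasql/autocomplete/engine.py | _get_keyword_prefix
-- ===== SOURCE A (Python) =====
-- word_separators = [' ', '\t', '\n', '.', ';', ',', '"', "'", '`', '#', '(',
--                    ')', '[', ']', '/', '=', '<', '>', '\\', '|', '+', '-', '%', '*']
--
-- def _get_keyword_prefix(text):
--     pos = len(text)
--     prefix = ''
--     while (True):
--         if pos == 0:
--             break
--
--         char = text[pos - 1]
--         if char in word_separators:
--             break
--
--         prefix = f'{char}{prefix}'
--         pos -= 1
--
--     return prefix
-- ===== SOURCE B (Python) =====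
-- word_separators = [' ', '\t', '\n', '.', ';', ',', '"', "'", '`', '#', '(',
--                    ')', '[', ']', '/', '=', '<', '>', '\\', '|', '+', '-', '%', '*']
--
-- def _get_keyword_prefix(text):
--     # Forward single pass: remember the index of the LAST separator seen,
--     # then slice the trailing substring once.
--     last = -1
--     for i, char in enumerate(text):
--         if char in word_separators:
--             last = i
--     return text[last + 1:]
-- ===== Notes on version B (the rewrite author's own statement) =====
-- stated objective: faster
-- what changed: Replaces the backward char-by-char loop that rebuilds the prefix by string prepending (quadratic in the suffix length) with a forward enumerate pass recording the index of the last separator, then one slice text[last+1:].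
import Mathlib
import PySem

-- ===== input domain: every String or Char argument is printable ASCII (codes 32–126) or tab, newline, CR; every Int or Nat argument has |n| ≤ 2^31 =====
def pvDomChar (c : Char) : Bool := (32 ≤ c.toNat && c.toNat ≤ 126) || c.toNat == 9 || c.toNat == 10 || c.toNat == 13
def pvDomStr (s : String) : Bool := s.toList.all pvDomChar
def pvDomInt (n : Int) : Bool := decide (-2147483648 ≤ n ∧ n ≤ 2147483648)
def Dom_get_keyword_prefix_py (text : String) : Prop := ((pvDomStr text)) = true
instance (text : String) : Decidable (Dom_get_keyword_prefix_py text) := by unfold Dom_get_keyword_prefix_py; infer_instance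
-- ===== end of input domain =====

set_option maxRecDepth 4000


-- B replaces A's backward char-by-char loop that prepends to an accumulator string
-- with a forward last-separator-index scan followed by a single slice (idiomatic).

-- ===== PORT A =====
def pySeps : List Char :=
  [' ', '\t', '\n', '.', ';', ',', '"', '\'', '`', '#', '(',
   ')', '[', ']', '/', '=', '<', '>', '\\', '|', '+', '-', '%', '*']

-- A's while loop: pos counts down; text[pos - 1] is always in range (0 < pos ≤ len),
-- so getD is exact here
def goA (cs : List Char) : Nat → List Char → List Char
  | 0, pre => pre
  | p + 1, pre =>
    let c := cs.getD p ' '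
    if c ∈ pySeps then pre else goA cs p (c :: pre)

def get_keyword_prefix_py (text : String) : String :=
  String.ofList (goA text.toList text.toList.length [])

-- ===== PORT B =====
-- the forward pass: for i, char in enumerate(text): if char in word_separators: last = i
def lastSepFold (cs : List Char) : Int :=
  (PySem.List.enumerate cs 0).foldl
    (fun acc p => if p.2 ∈ pySeps then p.1 else acc) (-1)

def get_keyword_prefix_py_alt (text : String) : String :=
  let last := lastSepFold text.toList
  String.ofList (PySem.List.slice text.toList (some (last + 1)) none)

-- ===== PRECONDITION & SPEC =====
def Spec_get_keyword_prefix_py (text : String) (out : String) : Prop := out = get_keyword_prefix_py_alt text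
instance (text : String) (out : String) : Decidable (Spec_get_keyword_prefix_py text out) := by unfold Spec_get_keyword_prefix_py; infer_instance

-- ===== CLAIM (what is proved, stated in full; the proofs are below) =====
def Claim_equal_get_keyword_prefix_py : Prop := ∀ (text : String), Dom_get_keyword_prefix_py text → Spec_get_keyword_prefix_py text (get_keyword_prefix_py text)

-- ===== LEMMAS AND PROOFS =====

-- the common characterisation uses the predicate "not a separator"
def notSep (c : Char) : Bool := decide (c ∉ pySeps)

-- A's loop returns the longest non-separator suffix of the first n characters
theorem goA_spec (cs : List Char) (n : Nat) (hn : n ≤ cs.length) (pre : List Char) :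
    goA cs n pre = ((cs.take n).reverse.takeWhile notSep).reverse ++ pre := by
  induction n generalizing pre with
  | zero => simp [goA]
  | succ p ih =>
    have hp : p < cs.length := by omega
    have htake : cs.take (p + 1) = cs.take p ++ [cs[p]] := by
      rw [List.take_add_one]
      simp [List.getElem?_eq_getElem hp]
    have hget : cs.getD p ' ' = cs[p] := List.getD_eq_getElem cs ' ' hp
    have hrev : (cs.take p ++ [cs[p]]).reverse = cs[p] :: (cs.take p).reverse := by simp
    have hunf : goA cs (p + 1) pre
        = if cs[p] ∈ pySeps then pre else goA cs p (cs[p] :: pre) := by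
      rw [goA, hget]
    rw [hunf, htake, hrev, List.takeWhile_cons]
    by_cases hc : cs[p] ∈ pySeps
    · have hns : notSep cs[p] = false := by simp [notSep, hc]
      rw [if_pos hc, hns]
      simp
    · have hns : notSep cs[p] = true := by simp [notSep, hc]
      rw [if_neg hc, hns, if_pos rfl, ih (by omega)]
      simp

-- B's forward fold computes length − (non-separator-suffix length) − 1, uniformly
theorem fold_spec (cs : List Char) (s : Int) (acc : Int) :
    (PySem.List.enumerate cs s).foldl
        (fun acc p => if p.2 ∈ pySeps then p.1 else acc) acc
      = (if (cs.reverse.takeWhile notSep).length = cs.length then acc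
         else s + ((cs.length - (cs.reverse.takeWhile notSep).length - 1 : Nat) : Int)) := by
  induction cs using List.reverseRecOn generalizing s acc with
  | nil => simp [PySem.List.enumerate_nil]
  | append_singleton l c ih =>
    have hk : (l.reverse.takeWhile notSep).length ≤ l.length :=
      by simpa using (List.takeWhile_prefix (l := l.reverse) notSep).length_le
    have henum : PySem.List.enumerate (l ++ [c]) s
        = PySem.List.enumerate l s ++ [((s + l.length : Int), c)] := by
      rw [PySem.List.enumerate_append, PySem.List.enumerate_cons, PySem.List.enumerate_nil]
    have hrev : (l ++ [c]).reverse = c :: l.reverse := by simp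
    rw [henum, List.foldl_append, List.foldl_cons, List.foldl_nil, ih, hrev,
      List.takeWhile_cons]
    dsimp only
    by_cases hc : c ∈ pySeps
    · have hns : notSep c = false := by simp [notSep, hc]
      rw [hns, if_pos hc]
      simp only [Bool.false_eq_true, if_false, List.length_nil,
        List.length_append, List.length_cons]
      rw [if_neg (by omega)]
      push_cast
      omega
    · have hns : notSep c = true := by simp [notSep, hc]
      rw [hns, if_pos rfl, if_neg hc]
      simp only [List.length_cons, List.length_append, List.length_nil]
      by_cases h1 : (l.reverse.takeWhile notSep).length = l.length
      · rw [if_pos h1, if_pos (by omega)]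
      · rw [if_neg h1, if_neg (by omega)]
        have : (l.reverse.takeWhile notSep).length < l.length := lt_of_le_of_ne hk h1
        congr 1
        push_cast
        omega

-- the reversed takeWhile of the reverse is a drop
theorem tw_rev_drop (l : List Char) :
    (l.reverse.takeWhile notSep).reverse
      = l.drop (l.length - (l.reverse.takeWhile notSep).length) := by
  have hpre : l.reverse.takeWhile notSep
      = l.reverse.take (l.reverse.takeWhile notSep).length :=
    (List.prefix_iff_eq_take).1 (List.takeWhile_prefix _)
  conv_lhs => rw [hpre]
  rw [List.take_reverse, List.reverse_reverse]

-- ===== VERDICT (by name: the statement is the Claim_ definition above) =====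
theorem get_keyword_prefix_py_spec : Claim_equal_get_keyword_prefix_py := by
  intro text _
  unfold Spec_get_keyword_prefix_py
  simp only [get_keyword_prefix_py, get_keyword_prefix_py_alt, lastSepFold]
  have hk : (text.toList.reverse.takeWhile notSep).length ≤ text.toList.length := by
    simpa using (List.takeWhile_prefix (l := text.toList.reverse) notSep).length_le
  rw [goA_spec text.toList text.toList.length le_rfl, fold_spec,
    List.take_length, List.append_nil]
  by_cases h : (text.toList.reverse.takeWhile notSep).length = text.toList.length
  · -- no separator anywhere: the whole string comes back
    have hall : text.toList.reverse.takeWhile notSep = text.toList.reverse := by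
      apply (List.takeWhile_prefix _).eq_of_length
      simpa using h
    rw [if_pos h]
    have h0 : (-1 : Int) + 1 = ((0 : Nat) : Int) := by norm_num
    rw [h0, PySem.List.slice_from_natCast, hall, List.reverse_reverse, List.drop_zero]
  · rw [if_neg h]
    have hlt : (text.toList.reverse.takeWhile notSep).length < text.toList.length :=
      lt_of_le_of_ne hk h
    have harith : (0 : Int)
          + ((text.toList.length - (text.toList.reverse.takeWhile notSep).length - 1 : Nat) : Int)
          + 1
        = ((text.toList.length - (text.toList.reverse.takeWhile notSep).length : Nat) : Int) := by
      omega
    rw [harith, PySem.List.slice_from_natCast, tw_rev_drop]
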